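-- pv_equiv track=rewrite | github.com/Juno-T/succint-bp | bp/parser.py | pos_str
-- ===== SOURCE A (Python) =====
-- from typing import List
--
-- str_prefix = " "
--
-- str_block_sep = " | "
--
-- def pos_str(pos: List[int], block_size=None):
--   s = ""
--   count =0
--   pos = sorted(pos)
--   for p in pos:
--     while count<p:
--       s+=str_prefix+" "
--       count+=1
--       if block_size!=None:
--         if count%block_size==0:
--           s+=" "*len(str_block_sep)
--     s+=str_prefix+"^"
--     count+=1
--     if block_size!=None:
--       if count%block_size==0:
--         s+=" "*len(str_block_sep)
--   return s
-- ===== SOURCE B (Python) =====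
-- str_prefix = " "
--
-- str_block_sep = " | "
--
-- def pos_str(pos, block_size=None):
--     # Phase 1: precompute caret column indices and the total column count.
--     carets = set()
--     count = 0
--     for p in sorted(pos):
--         idx = max(p, count)
--         carets.add(idx)
--         count = idx + 1
--     # Phase 2: render all columns in one flat pass.
--     parts = []
--     for i in range(count):
--         parts.append(str_prefix + ("^" if i in carets else " ")
--                      + (" " * len(str_block_sep)
--                         if block_size is not None and (i + 1) % block_size == 0 else ""))
--     return "".join(parts)
-- ===== Notes on version B (the rewrite author's own statement) =====
-- stated objective: alternative
-- what changed: A interleaves an inner pad-while loop and caret emission inside the for-loop over sorted positions; B first precomputes the caret column set (idx = max(p, count)) in one pass, then renders every column in a single flat range loop joined at the end.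
import Mathlib
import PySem

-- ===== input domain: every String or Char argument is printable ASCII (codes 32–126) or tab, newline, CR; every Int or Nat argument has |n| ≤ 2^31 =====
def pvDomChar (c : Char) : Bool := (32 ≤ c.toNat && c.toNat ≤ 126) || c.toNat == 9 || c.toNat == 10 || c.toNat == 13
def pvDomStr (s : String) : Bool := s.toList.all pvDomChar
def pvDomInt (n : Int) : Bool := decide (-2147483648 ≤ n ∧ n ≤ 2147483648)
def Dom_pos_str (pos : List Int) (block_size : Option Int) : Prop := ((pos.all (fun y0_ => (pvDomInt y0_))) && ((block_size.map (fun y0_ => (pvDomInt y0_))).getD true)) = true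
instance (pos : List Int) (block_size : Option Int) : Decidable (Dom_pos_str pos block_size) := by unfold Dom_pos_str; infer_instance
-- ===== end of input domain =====

-- B replaces A's interleaved pad-while/caret loop by a precompute-then-render decomposition
-- (first compute the caret column set, then emit all columns in one flat pass); objective: alternative.

-- ===== PORT A =====
-- the `if block_size != None: if count % block_size == 0: s += " "*len(str_block_sep)` suffix
-- (str_block_sep = " | " has length 3)
def sepSuffix (block_size : Option Int) (count : Int) : List Char :=
  match block_size with
  | none => []
  | some b => if PySem.Int.mod count b = 0 then [' ', ' ', ' '] else []

-- the inner `while count < p:` loop of A (str_prefix + " " = "  ")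
def padLoop (block_size : Option Int) (p : Int) (s : List Char) (count : Int) : List Char × Int :=
  if _h : count < p then
    padLoop block_size p (s ++ [' ', ' '] ++ sepSuffix block_size (count + 1)) (count + 1)
  else (s, count)
termination_by (p - count).toNat
decreasing_by omega

-- one iteration of A's `for p in pos:` body
def stepA (block_size : Option Int) (st : List Char × Int) (p : Int) : List Char × Int :=
  let st1 := padLoop block_size p st.1 st.2
  let s := st1.1 ++ [' ', '^']
  let count := st1.2 + 1
  (s ++ sepSuffix block_size count, count)

def pos_str (pos : List Int) (block_size : Option Int) : String :=
  String.ofList ((PySem.List.sorted pos (fun x => x) false).foldl (stepA block_size) ([], 0)).1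

-- ===== PORT B =====
-- phase 1 step: idx = max(p, count); carets.add(idx); count = idx + 1
def stepB (st : PySem.Set Int × Int) (p : Int) : PySem.Set Int × Int :=
  let idx := max p st.2
  (st.1.add idx, idx + 1)

-- phase 2: the part appended for column i
def renderCell (block_size : Option Int) (carets : PySem.Set Int) (i : Int) : List Char :=
  [' '] ++ (if carets.contains i then ['^'] else [' ']) ++ sepSuffix block_size (i + 1)

-- `"".join(parts)` is concatenation: the map-then-join is `.map … |>.flatten`
def pos_str_alt (pos : List Int) (block_size : Option Int) : String :=
  let st := (PySem.List.sorted pos (fun x => x) false).foldl stepB (PySem.Set.empty, 0)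
  String.ofList ((PySem.List.pyRange 0 st.2 1).map (renderCell block_size st.1)).flatten

-- ===== PRECONDITION & SPEC =====
-- Pre_ excludes exactly block_size = 0 with nonempty pos, where Python A raises
-- ZeroDivisionError on `count % block_size` (B raises there too).
def Pre_pos_str (pos : List Int) (block_size : Option Int) : Prop :=
  block_size = some 0 → pos = []
instance (pos : List Int) (block_size : Option Int) : Decidable (Pre_pos_str pos block_size) := by
  unfold Pre_pos_str; infer_instance
def pvWitness_pos_str : List Int × Option Int := ([1, 3, 3], some 2)
def Spec_pos_str (pos : List Int) (block_size : Option Int) (out : String) : Prop := out = pos_str_alt pos block_size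
instance (pos : List Int) (block_size : Option Int) (out : String) : Decidable (Spec_pos_str pos block_size out) := by unfold Spec_pos_str; infer_instance

-- ===== CLAIM (what is proved, stated in full; the proofs are below) =====
def Claim_equal_pos_str : Prop := ∀ (pos : List Int) (block_size : Option Int), Dom_pos_str pos block_size → Pre_pos_str pos block_size → Spec_pos_str pos block_size (pos_str pos block_size)

-- ===== LEMMAS AND PROOFS =====

-- B's rendered output for caret set S and total count n
def render (bs : Option Int) (S : PySem.Set Int) (n : Int) : List Char :=
  ((PySem.List.pyRange 0 n 1).map (renderCell bs S)).flatten

theorem contains_add_of_ne (T : PySem.Set Int) (x i : Int) (hne : i ≠ x) :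
    (T.add x).contains i = T.contains i := by
  rw [Bool.eq_iff_iff, PySem.Set.contains_iff, PySem.Set.contains_iff, PySem.Set.mem_add]
  constructor
  · rintro (h | h)
    · exact h
    · exact absurd h hne
  · exact Or.inl

theorem padLoop_spec (bs : Option Int) (p : Int) (s : List Char) (count : Int) :
    padLoop bs p s count
      = (s ++ ((PySem.List.pyRange count (max p count) 1).map
            (fun i => [' ', ' '] ++ sepSuffix bs (i + 1))).flatten, max p count) := by
  have H : ∀ (n : Nat) (s : List Char) (count : Int), (p - count).toNat = n →
      padLoop bs p s count
        = (s ++ ((PySem.List.pyRange count (max p count) 1).map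
              (fun i => [' ', ' '] ++ sepSuffix bs (i + 1))).flatten, max p count) := by
    intro n
    induction n with
    | zero =>
      intro s count h
      have hnp : ¬ count < p := by omega
      rw [padLoop, dif_neg hnp, max_eq_right (by omega),
        PySem.List.pyRange_one_eq_nil (le_refl count)]
      simp
    | succ n ih =>
      intro s count h
      have hlt : count < p := by omega
      rw [padLoop, dif_pos hlt, ih _ _ (by omega),
        max_eq_left (by omega), max_eq_left (by omega),
        PySem.List.pyRange_one_cons hlt]
      simp [List.append_assoc]
  exact H _ s count rfl

theorem render_extend (bs : Option Int) (S : PySem.Set Int) (count idx : Int)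
    (h0 : 0 ≤ count) (hle : count ≤ idx) (hb : ∀ x ∈ S, x < count) :
    render bs (S.add idx) (idx + 1)
      = render bs S count
        ++ ((PySem.List.pyRange count idx 1).map
              (fun i => [' ', ' '] ++ sepSuffix bs (i + 1))).flatten
        ++ ([' ', '^'] ++ sepSuffix bs (idx + 1)) := by
  unfold render
  rw [PySem.List.pyRange_one_append 0 count (idx + 1) h0 (by omega),
    PySem.List.pyRange_one_succ_right hle]
  have h1 : (PySem.List.pyRange 0 count 1).map (renderCell bs (S.add idx))
      = (PySem.List.pyRange 0 count 1).map (renderCell bs S) := by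
    apply List.map_congr_left
    intro i hi
    have hib := (PySem.List.mem_pyRange_one.1 hi)
    unfold renderCell
    rw [contains_add_of_ne S idx i (by omega)]
  have h2 : (PySem.List.pyRange count idx 1).map (renderCell bs (S.add idx))
      = (PySem.List.pyRange count idx 1).map (fun i => [' ', ' '] ++ sepSuffix bs (i + 1)) := by
    apply List.map_congr_left
    intro i hi
    have hib := (PySem.List.mem_pyRange_one.1 hi)
    have hnm : i ∉ S.add idx := by
      rw [PySem.Set.mem_add]
      rintro (h | h)
      · exact absurd (hb _ h) (by omega)
      · omega
    have hcf : (S.add idx).contains i = false := by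
      cases hcc : (S.add idx).contains i
      · rfl
      · exact absurd ((PySem.Set.contains_iff _ _).1 hcc) hnm
    unfold renderCell
    rw [hcf]
    rfl
  have h3 : renderCell bs (S.add idx) idx = [' ', '^'] ++ sepSuffix bs (idx + 1) := by
    have hct : (S.add idx).contains idx = true :=
      (PySem.Set.contains_iff _ _).2 ((PySem.Set.mem_add _ _ _).2 (Or.inr rfl))
    unfold renderCell
    rw [hct]
    rfl
  simp only [List.map_append, List.flatten_append, List.map_cons, List.map_nil,
    List.flatten_cons, List.flatten_nil, h1, h2, h3]
  simp [List.append_assoc]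

theorem loop_inv (bs : Option Int) (l : List Int) :
    ∀ (S : PySem.Set Int) (count : Int), 0 ≤ count → (∀ x ∈ S, x < count) →
    l.foldl (stepA bs) (render bs S count, count)
        = (render bs (l.foldl stepB (S, count)).1 (l.foldl stepB (S, count)).2,
            (l.foldl stepB (S, count)).2)
      ∧ 0 ≤ (l.foldl stepB (S, count)).2
      ∧ (∀ x ∈ (l.foldl stepB (S, count)).1, x < (l.foldl stepB (S, count)).2) := by
  induction l with
  | nil => intro S count h0 hb; exact ⟨rfl, h0, hb⟩
  | cons p l ih =>
    intro S count h0 hb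
    have hle : count ≤ max p count := le_max_right _ _
    have hA : stepA bs (render bs S count, count) p
        = (render bs (S.add (max p count)) (max p count + 1), max p count + 1) := by
      simp only [stepA, padLoop_spec]
      rw [render_extend bs S count (max p count) h0 hle hb]
      simp [List.append_assoc]
    have hB : stepB (S, count) p = (S.add (max p count), max p count + 1) := rfl
    have hb' : ∀ x ∈ S.add (max p count), x < max p count + 1 := by
      intro x hx
      rcases (PySem.Set.mem_add _ _ _).1 hx with h | h
      · have := hb _ h; omega
      · omega
    simp only [List.foldl_cons, hA, hB]
    exact ih (S.add (max p count)) (max p count + 1) (by omega) hb'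

theorem render_empty (bs : Option Int) : render bs PySem.Set.empty 0 = [] := by
  unfold render
  rw [PySem.List.pyRange_one_eq_nil (le_refl 0)]
  rfl

-- ===== VERDICT (by name: the statement is the Claim_ definition above) =====
theorem pos_str_spec : Claim_equal_pos_str := by
  intro pos bs _ _
  unfold Spec_pos_str pos_str pos_str_alt
  have hinit : (∀ x ∈ PySem.Set.empty (α := Int), x < (0 : Int)) := by
    intro x hx; exact absurd hx (List.not_mem_nil)
  have h := (loop_inv bs (PySem.List.sorted pos (fun x => x) false) PySem.Set.empty 0
    (le_refl 0) hinit).1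
  rw [render_empty] at h
  rw [h]
  rfl
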